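-- pv_equiv track=rewrite | github.com/BrianLi009/PhysicsCheck | orderly_generation/canonical.py | row_to_col_cubic
-- ===== SOURCE A (Python) =====
-- from math import comb, perm
--
-- def matching(v):
--     num_edges = comb(v, 2)
--     all_entries = list(range(1, num_edges+1))
--     matching = {}
--     all_cols = []
--     col_size = 1
--     while all_entries != []:
--         col = []
--         while len(col) < col_size:
--             col.append(all_entries.pop(0))
--         col_size += 1
--         all_cols.append(col)
--     original_order = list(range(1, num_edges+1))
--     i = 0
--     while i < original_order[-1]:
--         for col in all_cols:
--             if col != []:
--                 matching[original_order[i]] = col.pop(0)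
--                 i += 1
--     return matching
--
-- def row_to_col_cubic(encoding, v):
--     """given a cubic encoding, we also turn it into column form using new_assignment"""
--     new_encoding = []
--     matches = matching(v)
--     for clause in encoding:
--         new_clause = []
--         for variable in clause:
--             if abs(variable) in matches.keys():
--                 if variable > 0:
--                     new_var = matches[abs(variable)]
--                 else:
--                     new_var = -matches[abs(variable)]
--                 new_clause.append(new_var)
--             else:
--                 new_clause.append(variable)
--         new_encoding.append(new_clause)
--     return new_encoding
-- ===== SOURCE B (Python) =====
-- def row_to_col_cubic(encoding, v):
--     """given a cubic encoding, we also turn it into column form using new_assignment"""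
--     m = v - 1
--     # vals[k-1] is the column-order edge number for row-order edge k:
--     # key sequence enumerates (r, c) with 0 <= r <= c < m, by r then c;
--     # the value is the r-th entry of triangular column c, i.e. c*(c+1)//2 + r + 1.
--     vals = []
--     for r in range(m):
--         for c in range(r, m):
--             vals.append(c * (c + 1) // 2 + r + 1)
--     E = len(vals)
--     def conv(x):
--         a = abs(x)
--         if 1 <= a <= E:
--             t = vals[a - 1]
--             return t if x > 0 else -t
--         return x
--     return [[conv(x) for x in clause] for clause in encoding]
-- ===== Notes on version B (the rewrite author's own statement) =====
-- stated objective: faster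
-- what changed: B computes the row-to-column edge renumbering directly by triangular-index arithmetic (one linear build of the value table, indexed lookups) instead of A's simulation that materialises columns with repeated pop(0) and reads them back in round-robin passes.
import Mathlib
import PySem

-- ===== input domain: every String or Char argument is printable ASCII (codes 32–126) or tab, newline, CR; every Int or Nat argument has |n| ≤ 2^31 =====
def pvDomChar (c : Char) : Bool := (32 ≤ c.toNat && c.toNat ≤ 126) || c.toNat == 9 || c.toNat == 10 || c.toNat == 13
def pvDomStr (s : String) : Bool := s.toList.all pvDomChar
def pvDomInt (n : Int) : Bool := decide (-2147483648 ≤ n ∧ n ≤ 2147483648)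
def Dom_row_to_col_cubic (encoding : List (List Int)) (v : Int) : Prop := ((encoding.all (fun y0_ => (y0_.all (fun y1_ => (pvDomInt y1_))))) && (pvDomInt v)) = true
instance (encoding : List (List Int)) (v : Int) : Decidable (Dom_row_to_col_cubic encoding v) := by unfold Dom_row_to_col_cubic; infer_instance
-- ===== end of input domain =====

-- B replaces A's quadratic pop(0)-based round-robin construction of the row→column mapping by
-- direct triangular-index arithmetic (one linear build of the value table); return values agree for v ≥ 2.

-- ===== PORT A =====

-- inner while of matching's first loop: pop the first `need` entries into a column
def pvFill (es : List Int) (need : Nat) : List Int × List Int :=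
  match need, es with
  | 0, es => ([], es)
  | _+1, [] => ([], [])          -- Python would raise IndexError here; unreachable for v ≥ 2
  | n+1, e :: es => let p := pvFill es n; (e :: p.1, p.2)

-- needed by pvBuildCols' termination proof
theorem pvFill_eq (es : List Int) (n : Nat) : pvFill es n = (es.take n, es.drop n) := by
  induction n generalizing es with
  | zero => simp [pvFill]
  | succ n ih => cases es <;> simp [pvFill, ih]

-- outer while of matching's first loop; k+1 is the current col_size
def pvBuildCols (es : List Int) (k : Nat) : List (List Int) :=
  if h : es = [] then [] else
    (pvFill es (k+1)).1 :: pvBuildCols ((pvFill es (k+1)).2) (k+1)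
termination_by es.length
decreasing_by
  rw [pvFill_eq]
  have : 0 < es.length := List.length_pos_of_ne_nil h
  simp only [List.length_drop]
  omega

-- one `for col in all_cols` pass of matching's second loop; key = original_order[i] = i+1
def pvPass (d : PySem.Dict Int Int) (cols : List (List Int)) (i : Int) :
    PySem.Dict Int Int × List (List Int) × Int :=
  match cols with
  | [] => (d, [], i)
  | [] :: rest => let r := pvPass d rest i; (r.1, [] :: r.2.1, r.2.2)
  | (x :: xs) :: rest =>
      let r := pvPass (d.insert (i+1) x) rest (i+1)
      (r.1, xs :: r.2.1, r.2.2)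

-- matching's second while loop ('while i < original_order[-1]'); fuel-guarded (the loop makes
-- at most num_edges passes on A's actual inputs, so the fuel never runs out there)
def pvRR (fuel : Nat) (d : PySem.Dict Int Int) (cols : List (List Int)) (i bound : Int) :
    PySem.Dict Int Int :=
  match fuel with
  | 0 => d
  | f+1 =>
    if i < bound then
      let r := pvPass d cols i
      pvRR f r.1 r.2.1 r.2.2 bound
    else d

def pvMatching (v : Int) : PySem.Dict Int Int :=
  let numEdges := PySem.Int.floordiv (v * (v-1)) 2   -- comb(v, 2); Python raises for v < 0 (outside Pre_)
  let entries := PySem.List.pyRange 1 (numEdges+1) 1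
  let cols := pvBuildCols entries 0
  -- bound = original_order[-1] = numEdges (IndexError when numEdges = 0, i.e. v ∈ {0,1}; outside Pre_)
  pvRR (numEdges.toNat + 1) PySem.Dict.empty cols 0 numEdges

def row_to_col_cubic (encoding : List (List Int)) (v : Int) : List (List Int) :=
  let ms := pvMatching v
  encoding.map (fun clause => clause.map (fun var =>
    match ms.get? |var| with          -- 'abs(variable) in matches.keys()'
    | some mv => if var > 0 then mv else -mv
    | none => var))

-- ===== PORT B =====

-- vals[k-1] = column-order edge number for row-order edge k (Source B's nested for over ranges)
def pvVals (v : Int) : List Int :=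
  (PySem.List.pyRange 0 (v-1) 1).flatMap (fun r =>
    (PySem.List.pyRange r (v-1) 1).map (fun c => PySem.Int.floordiv (c*(c+1)) 2 + r + 1))

-- Source B's conv
def pvConv (vals : List Int) (E : Int) (x : Int) : Int :=
  let a := |x|
  if 1 ≤ a ∧ a ≤ E then
    match PySem.List.pyGet? vals (a-1) with     -- vals[a-1]; the guard keeps the index in range
    | some t => if x > 0 then t else -t
    | none => x                                  -- unreachable under the guard
  else x

def row_to_col_cubic_alt (encoding : List (List Int)) (v : Int) : List (List Int) :=
  let vals := pvVals v
  let E : Int := vals.length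
  encoding.map (fun clause => clause.map (pvConv vals E))

-- ===== PRECONDITION & SPEC =====
-- A raises for v < 2 (ValueError from comb for v < 0, IndexError from original_order[-1] for v ∈ {0,1})
def Pre_row_to_col_cubic (encoding : List (List Int)) (v : Int) : Prop := 2 ≤ v
instance (encoding : List (List Int)) (v : Int) : Decidable (Pre_row_to_col_cubic encoding v) := by
  unfold Pre_row_to_col_cubic; infer_instance

def pvWitness_row_to_col_cubic : List (List Int) × Int := ([[1, -2, 4], [3]], 3)

def Spec_row_to_col_cubic (encoding : List (List Int)) (v : Int) (out : List (List Int)) : Prop := out = row_to_col_cubic_alt encoding v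
instance (encoding : List (List Int)) (v : Int) (out : List (List Int)) : Decidable (Spec_row_to_col_cubic encoding v out) := by unfold Spec_row_to_col_cubic; infer_instance

-- ===== CLAIM (what is proved, stated in full; the proofs are below) =====
def Claim_equal_row_to_col_cubic : Prop := ∀ (encoding : List (List Int)) (v : Int), Dom_row_to_col_cubic encoding v → Pre_row_to_col_cubic encoding v → Spec_row_to_col_cubic encoding v (row_to_col_cubic encoding v)

-- ===== LEMMAS AND PROOFS =====

-- Σ_{c<t} (k+1+c): sizes of columns k, …, k+t-1 (column index offset by k)
def pvSsum (k t : Nat) : Nat :=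
  match t with
  | 0 => 0
  | t+1 => (k+1) + pvSsum (k+1) t

theorem pvSsum_closed (t k : Nat) : 2 * pvSsum k t = t * (2*k + t + 1) := by
  induction t generalizing k with
  | zero => simp [pvSsum]
  | succ t ih =>
    show 2 * ((k+1) + pvSsum (k+1) t) = _
    rw [Nat.mul_add, ih (k+1)]; ring

-- sequential insertion with keys i+1, i+2, …
def pvInsRun (d : PySem.Dict Int Int) (i : Int) (vs : List Int) : PySem.Dict Int Int :=
  match vs with
  | [] => d
  | x :: xs => pvInsRun (d.insert (i+1) x) (i+1) xs

def pvTotal (cols : List (List Int)) : Nat := (cols.map List.length).sum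

theorem pvHeads_total (cols : List (List Int)) :
    (cols.filterMap List.head?).length + pvTotal (cols.map List.tail) = pvTotal cols := by
  induction cols with
  | nil => simp [pvTotal]
  | cons c rest ih =>
    cases c <;> simp [pvTotal, List.filterMap_cons] at * <;> omega

theorem pvHeads_nil_iff (cols : List (List Int)) :
    cols.filterMap List.head? = [] ↔ pvTotal cols = 0 := by
  induction cols with
  | nil => simp [pvTotal]
  | cons c rest ih =>
    cases c <;> simp [pvTotal, List.filterMap_cons] at * <;> simp [ih, pvTotal]

-- round-robin flattening of the columns (the order matching's second loop reads them in)
def pvFlat (cols : List (List Int)) : List Int :=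
  if h : cols.filterMap List.head? = [] then [] else
    cols.filterMap List.head? ++ pvFlat (cols.map List.tail)
termination_by pvTotal cols
decreasing_by
  simp only [List.map_subtype, List.unattach_attach]
  have h1 := pvHeads_total cols
  have h2 : (cols.filterMap List.head?).length ≠ 0 := by
    simpa using fun hh => h (List.length_eq_zero_iff.mp hh)
  omega

theorem pvFlat_length (cols : List (List Int)) : (pvFlat cols).length = pvTotal cols := by
  fun_induction pvFlat with
  | case1 cols h => simp [(pvHeads_nil_iff cols).mp h]
  | case2 cols h ih =>
    have := pvHeads_total cols
    simp only [List.map_subtype, List.unattach_attach] at ih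
    simp only [List.length_append, ih]
    omega

theorem pvPass_spec (cols : List (List Int)) (d : PySem.Dict Int Int) (i : Int) :
    pvPass d cols i = (pvInsRun d i (cols.filterMap List.head?), cols.map List.tail,
      i + (cols.filterMap List.head?).length) := by
  induction cols generalizing d i with
  | nil => simp [pvPass, pvInsRun]
  | cons c rest ih =>
    cases c with
    | nil => simp [pvPass, ih, List.filterMap_cons]
    | cons x xs =>
      simp [pvPass, ih, List.filterMap_cons, pvInsRun]
      omega

theorem pvInsRun_append (d : PySem.Dict Int Int) (i : Int) (us vs : List Int) :
    pvInsRun d i (us ++ vs) = pvInsRun (pvInsRun d i us) (i + us.length) vs := by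
  induction us generalizing d i with
  | nil => simp [pvInsRun]
  | cons x xs ih =>
    simp only [List.cons_append, pvInsRun, ih, List.length_cons]
    congr 1
    push_cast; ring

theorem pvRR_eq (fuel : Nat) (d : PySem.Dict Int Int) (cols : List (List Int)) (i bound : Int)
    (hi : i + (pvTotal cols : Int) = bound) (hf : pvTotal cols ≤ fuel) :
    pvRR fuel d cols i bound = pvInsRun d i (pvFlat cols) := by
  induction fuel generalizing d cols i with
  | zero =>
    have h0 : pvTotal cols = 0 := by omega
    rw [pvFlat, dif_pos ((pvHeads_nil_iff cols).mpr h0)]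
    simp [pvRR, pvInsRun]
  | succ f ih =>
    by_cases hib : i < bound
    · have htot : 0 < pvTotal cols := by omega
      have hhs : cols.filterMap List.head? ≠ [] := by
        intro hh; have := (pvHeads_nil_iff cols).mp hh; omega
      have hlen := pvHeads_total cols
      have hlenpos : 0 < (cols.filterMap List.head?).length := by
        cases hcc : cols.filterMap List.head? with
        | nil => exact absurd hcc hhs
        | cons a b => simp [hcc]
      rw [pvRR, if_pos hib, pvPass_spec]
      dsimp only
      rw [ih _ _ _ (by push_cast; omega) (by omega)]
      conv_rhs => rw [pvFlat, dif_neg hhs]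
      rw [pvInsRun_append]
    · have h0 : pvTotal cols = 0 := by omega
      rw [pvFlat, dif_pos ((pvHeads_nil_iff cols).mpr h0)]
      simp [pvRR, hib, pvInsRun]

theorem pvInsRun_get (vs : List Int) (d : PySem.Dict Int Int) (i k : Int) :
    (pvInsRun d i vs).get? k =
      if i < k ∧ k ≤ i + vs.length then vs[(k - i - 1).toNat]? else d.get? k := by
  induction vs generalizing d i with
  | nil =>
    simp only [pvInsRun, List.length_nil, Nat.cast_zero, add_zero]
    rw [if_neg (by omega)]
  | cons x xs ih =>
    simp only [pvInsRun, ih, List.length_cons]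
    by_cases hk : k = i + 1
    · subst hk
      rw [if_neg (by omega), if_pos (by omega)]
      simp [PySem.Dict.get?_insert_self]
    · by_cases hin : i + 1 < k ∧ k ≤ i + 1 + (xs.length : Int)
      · rw [if_pos hin, if_pos (by omega)]
        have h1 : (k - i - 1).toNat = (k - (i+1) - 1).toNat + 1 := by omega
        rw [h1]
        simp
      · rw [if_neg hin, if_neg (by omega)]
        exact PySem.Dict.get?_insert_of_ne _ _ hk

-- the columns built by matching's first loop, characterised
def pvTC (m : Nat) : List (List Int) :=
  (List.range m).map (fun c => (List.range (c+1)).map (fun j => ((pvSsum 0 c + j : Nat) : Int) + 1))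

theorem pvBuildCols_spec (t : Nat) : ∀ (k : Nat) (es : List Int), es.length = pvSsum k t →
    pvBuildCols es k = (List.range t).map (fun c => (es.drop (pvSsum k c)).take (k + c + 1)) := by
  induction t with
  | zero =>
    intro k es h
    have : es = [] := List.length_eq_zero_iff.mp (by simpa [pvSsum] using h)
    subst this; simp [pvBuildCols]
  | succ t ih =>
    intro k es h
    have hne : es ≠ [] := by
      intro hh; subst hh; simp [pvSsum] at h; omega
    rw [pvBuildCols, dif_neg hne, pvFill_eq]
    rw [ih (k+1) (es.drop (k+1)) (by simp [h, pvSsum])]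
    rw [List.range_succ_eq_map]
    simp only [List.map_cons, List.map_map]
    congr 1
    refine List.map_congr_left (fun c hc => ?_)
    simp only [Function.comp_apply, List.drop_drop]
    have h1 : pvSsum k (c+1) = (k+1) + pvSsum (k+1) c := rfl
    have h3 : k + 1 + c + 1 = k + (c+1) + 1 := by omega
    rw [h1, h3]


theorem pvSsum_add (a : Nat) : ∀ (k b : Nat), pvSsum k (a + b) = pvSsum k a + pvSsum (k + a) b := by
  induction a with
  | zero => intro k b; simp [pvSsum]
  | succ a ih =>
    intro k b
    have h1 : a + 1 + b = (a + b) + 1 := by omega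
    rw [h1]
    show (k+1) + pvSsum (k+1) (a + b) = pvSsum k (a+1) + pvSsum (k + (a+1)) b
    rw [ih (k+1) b]
    have h2 : pvSsum k (a+1) = (k+1) + pvSsum (k+1) a := rfl
    have h3 : k + 1 + a = k + (a+1) := by omega
    rw [h2, h3]
    omega

theorem pvSsum_tri (c : Nat) : c * (c + 1) / 2 = pvSsum 0 c := by
  have h : c * (c + 1) = 2 * pvSsum 0 c := by
    simpa using (pvSsum_closed c 0).symm
  rw [h, Nat.mul_div_cancel_left _ (by norm_num)]

-- the columns matching's first loop builds from entries [1..T(m)]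
theorem pvCols_eq (m : Nat) :
    pvBuildCols ((List.range (pvSsum 0 m)).map (fun (j : Nat) => 1 + (j : Int))) 0 = pvTC m := by
  rw [pvBuildCols_spec m 0 _ (by simp)]
  refine List.map_congr_left (fun c hc => ?_)
  have hcm : c < m := List.mem_range.mp hc
  have hle : pvSsum 0 c + (c + 1) ≤ pvSsum 0 m := by
    have hx : pvSsum c 1 = c + 1 := rfl
    have h1 := pvSsum_add c 0 1
    rw [Nat.zero_add, hx] at h1
    have h2 := pvSsum_add (c+1) 0 (m - (c+1))
    rw [Nat.zero_add, Nat.add_sub_cancel' (by omega : c + 1 ≤ m)] at h2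
    omega
  apply List.ext_getElem
  · simp; omega
  · intro i h1 h2
    simp only [List.getElem_take, List.getElem_drop, List.getElem_map, List.getElem_range]
    omega

-- round r of matching's second loop reads these values
def pvRow (m r : Nat) : List Int :=
  (List.range (m - r)).map (fun j => ((pvSsum 0 (r + j) + r : Nat) : Int) + 1)

theorem pvTC_heads (m r : Nat) :
    (((pvTC m).map (List.drop r)).filterMap List.head?) = pvRow m r := by
  rw [pvTC, List.map_map, List.filterMap_map]
  simp only [Function.comp_def]
  by_cases hrm : r ≤ m
  · obtain ⟨s, rfl⟩ : ∃ s, m = r + s := ⟨m - r, by omega⟩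
    rw [List.range_add, List.filterMap_append, List.filterMap_map]
    have h1 : (List.range r).filterMap
        (fun c => (((List.range (c+1)).map (fun j => ((pvSsum 0 c + j : Nat) : Int) + 1)).drop r).head?) = [] := by
      refine List.filterMap_eq_nil_iff.mpr (fun c hc => ?_)
      have : c < r := List.mem_range.mp hc
      simp [List.head?_drop, List.getElem?_map]
      omega
    rw [h1, List.nil_append, pvRow]
    rw [List.filterMap_congr (g := fun j => some (((pvSsum 0 (r + j) + r : Nat) : Int) + 1)) ?_]
    · simp
    · intro j hj
      simp [List.getElem?_range, show r < r + j + 1 from by omega]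
  · have hmr : m - r = 0 := by omega
    rw [pvRow, hmr]
    simp only [List.range_zero, List.map_nil]
    refine List.filterMap_eq_nil_iff.mpr (fun c hc => ?_)
    have : c < m := List.mem_range.mp hc
    simp [List.head?_drop, List.getElem?_map]
    omega

theorem pvTC_tails (m r : Nat) :
    ((pvTC m).map (List.drop r)).map List.tail = (pvTC m).map (List.drop (r+1)) := by
  rw [List.map_map]
  refine List.map_congr_left (fun c _ => ?_)
  simp [List.tail_drop]

-- the rows still to be read from round r on
def pvVF (m r : Nat) : List Int :=
  if h : r < m then pvRow m r ++ pvVF m (r+1) else []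
termination_by m - r

theorem pvRow_ne_nil (m r : Nat) (h : r < m) : pvRow m r ≠ [] := by
  simp [pvRow]
  omega

theorem pvFlat_TC (m : Nat) : ∀ (r : Nat), pvFlat ((pvTC m).map (List.drop r)) = pvVF m r := by
  have H : ∀ (fuel r : Nat), m - r ≤ fuel → pvFlat ((pvTC m).map (List.drop r)) = pvVF m r := by
    intro fuel
    induction fuel with
    | zero =>
      intro r hr
      have hrm : ¬ r < m := by omega
      rw [pvVF, dif_neg hrm, pvFlat, dif_pos (by rw [pvTC_heads]; exact by simp [pvRow, show m - r = 0 from by omega])]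
    | succ f ih =>
      intro r hr
      by_cases hrm : r < m
      · rw [pvFlat, dif_neg (by rw [pvTC_heads]; exact pvRow_ne_nil m r hrm)]
        rw [pvTC_heads, pvTC_tails, ih (r+1) (by omega)]
        conv_rhs => rw [pvVF, dif_pos hrm]
      · rw [pvVF, dif_neg hrm, pvFlat, dif_pos (by rw [pvTC_heads]; exact by simp [pvRow, show m - r = 0 from by omega])]
  exact fun r => H (m - r) r le_rfl

-- B's table, Nat-indexed
theorem pvVals_eq (v : Int) (hv : 2 ≤ v) : pvVals v = pvVF ((v-1).toNat) 0 := by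
  have H : ∀ (fuel m r : Nat), m - r ≤ fuel →
      pvVF m r = ((List.range (m - r)).map (fun j => r + j)).flatMap
        (fun r' => pvRow m r') := by
    intro fuel
    induction fuel with
    | zero => intro m r h; rw [pvVF, dif_neg (by omega)]; simp [show m - r = 0 from by omega]
    | succ f ih =>
      intro m r h
      by_cases hrm : r < m
      · rw [pvVF, dif_pos hrm, ih m (r+1) (by omega)]
        have h1 : m - r = (m - (r+1)) + 1 := by omega
        rw [h1, List.range_succ_eq_map]
        simp only [List.map_cons, List.flatMap_cons, List.map_map, Nat.add_zero]
        congr 1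
        refine congrArg _ ?_
        refine List.map_congr_left (fun j _ => ?_)
        simp only [Function.comp_apply]
        omega
      · rw [pvVF, dif_neg hrm]; simp [show m - r = 0 from by omega]
  set m := (v-1).toNat with hm
  have hmv : (m : Int) = v - 1 := by rw [hm]; exact Int.toNat_of_nonneg (by omega)
  rw [H m m 0 le_rfl]
  rw [pvVals]
  rw [PySem.List.pyRange_one 0 (v-1)]
  have hz : (v - 1 - 0).toNat = m := by omega
  rw [hz, List.flatMap_map]
  rw [show ((List.range (m - 0)).map (fun j => 0 + j)) = List.range m from by simp]
  refine List.flatMap_congr (fun k hk => ?_)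
  have hkm : k < m := List.mem_range.mp hk
  rw [PySem.List.pyRange_one, pvRow]
  have h2 : (v - 1 - (0 + (k:Int))).toNat = m - k := by omega
  rw [h2, List.map_map]
  refine List.map_congr_left (fun j hj => ?_)
  have hjm : j < m - k := List.mem_range.mp hj
  simp only [Function.comp_apply]
  have hc : (0 + (k:Int)) + (j:Int) = ((k + j : Nat) : Int) := by push_cast; ring
  rw [hc]
  have hp : ((k + j : Nat) : Int) * (((k + j : Nat) : Int) + 1) = (((k+j) * (k+j+1) : Nat) : Int) := by
    push_cast; ring
  have hq : PySem.Int.floordiv (((k+j) * (k+j+1) : Nat) : Int) 2 = ((((k+j) * (k+j+1)) / 2 : Nat) : Int) := by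
    exact_mod_cast PySem.Int.floordiv_natCast ((k+j) * (k+j+1)) 2
  rw [hp, hq, pvSsum_tri]
  push_cast; ring

theorem pvTotal_TC (m : Nat) : pvTotal (pvTC m) = pvSsum 0 m := by
  have H : ∀ (t k : Nat), ((List.range t).map (fun c => k + c + 1)).sum = pvSsum k t := by
    intro t
    induction t with
    | zero => simp [pvSsum]
    | succ t ih =>
      intro k
      rw [List.range_succ_eq_map]
      simp only [List.map_cons, List.sum_cons, List.map_map]
      have h1 : ((List.range t).map ((fun c => k + c + 1) ∘ Nat.succ)).sum
          = ((List.range t).map (fun c => (k+1) + c + 1)).sum := by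
        congr 1
        refine List.map_congr_left (fun c _ => ?_)
        simp [Function.comp_apply]
        omega
      rw [h1, ih (k+1)]
      have hs : pvSsum k (t+1) = (k+1) + pvSsum (k+1) t := rfl
      omega
  have := H m 0
  simp only [Nat.zero_add] at this
  rw [pvTotal, pvTC, List.map_map]
  rw [← this]
  congr 1
  refine List.map_congr_left (fun c _ => ?_)
  simp

-- what matching's dictionary looks up to, for every key
theorem pvMatching_get (v : Int) (hv : 2 ≤ v) (k : Int) :
    (pvMatching v).get? k =
      if 0 < k ∧ k ≤ ((pvVals v).length : Int) then (pvVals v)[(k - 1).toNat]? else none := by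
  set m := (v-1).toNat with hm
  have hmv : (m : Int) = v - 1 := by rw [hm]; exact Int.toNat_of_nonneg (by omega)
  have hv1 : v = (m : Int) + 1 := by omega
  have hprod : v * (v - 1) = ((m * (m + 1) : Nat) : Int) := by rw [hv1]; push_cast; ring
  have hE : PySem.Int.floordiv (v * (v-1)) 2 = ((pvSsum 0 m : Nat) : Int) := by
    have h2 : PySem.Int.floordiv ((m * (m+1) : Nat) : Int) 2 = (((m * (m+1)) / 2 : Nat) : Int) := by
      exact_mod_cast PySem.Int.floordiv_natCast (m * (m+1)) 2
    rw [hprod, h2, pvSsum_tri]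
  simp only [pvMatching, hE]
  have hent : PySem.List.pyRange 1 (((pvSsum 0 m : Nat) : Int) + 1) 1
      = (List.range (pvSsum 0 m)).map (fun (j : Nat) => 1 + (j : Int)) := by
    rw [PySem.List.pyRange_one]
    congr 1
    simp
  rw [hent, pvCols_eq]
  have hflat : pvFlat (pvTC m) = pvVals v := by
    have h0 : (pvTC m).map (List.drop 0) = pvTC m := by
      rw [show (List.drop 0 : List Int → List Int) = id from funext fun _ => rfl, List.map_id]
    rw [← h0, pvFlat_TC m 0, ← pvVals_eq v hv]
  rw [pvRR_eq _ _ _ _ _ (by rw [pvTotal_TC]; omega) (by rw [pvTotal_TC]; omega)]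
  rw [hflat, pvInsRun_get]
  have hlen : (pvVals v).length = pvTotal (pvTC m) := by
    rw [← hflat, pvFlat_length]
  by_cases hk : 0 < k ∧ k ≤ ((pvVals v).length : Int)
  · rw [if_pos (by omega), if_pos hk]
    congr 2
    omega
  · rw [if_neg (by omega), if_neg hk]
    simp


-- ===== VERDICT (by name: the statement is the Claim_ definition above) =====
theorem row_to_col_cubic_spec : Claim_equal_row_to_col_cubic := by
  intro encoding v _ hv
  unfold Spec_row_to_col_cubic row_to_col_cubic row_to_col_cubic_alt
  refine List.map_congr_left (fun clause _ => ?_)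
  refine List.map_congr_left (fun x _ => ?_)
  rw [pvMatching_get v hv]
  rw [pvConv]
  by_cases hx : 1 ≤ |x| ∧ |x| ≤ ((pvVals v).length : Int)
  · rw [if_pos (by omega), if_pos hx]
    rw [PySem.List.pyGet?_of_nonneg _ (by omega)]
  · rw [if_neg (by omega), if_neg hx]
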